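-- pv_equiv track=rewrite | github.com/connierobin/H2combustion_CVs | H2COMBUSTION_DATA-main-2/H2Combustion-coord_nums/scripts/pca_v_ae.py | paired_atoms
-- ===== SOURCE A (Python) =====
-- def paired_atoms(atom_positions):
--     pairs_A = []
--     pairs_B = []
--     for i in range(len(atom_positions)):
--         for j in range(i+1, len(atom_positions)):
--             pairs_A.append(atom_positions[i])
--             pairs_B.append(atom_positions[j])
--     return pairs_A, pairs_B
-- ===== SOURCE B (Python) =====
-- def paired_atoms(atom_positions):
--     # No pair enumeration: build each output list independently.
--     n = len(atom_positions)
--     pairs_A = []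
--     rem = n - 1
--     for x in atom_positions:          # each element repeated once per later partner
--         pairs_A += [x] * rem
--         rem -= 1
--     pairs_B = []
--     for k in range(1, n):             # concatenation of all proper suffixes
--         pairs_B += atom_positions[k:]
--     return pairs_A, pairs_B
-- ===== Notes on version B (the rewrite author's own statement) =====
-- stated objective: alternative
-- what changed: Removes the interleaved nested i/j loop entirely: pairs_A and pairs_B are built by two independent single passes, pairs_A by replicating each element by its count of later partners ([x]*rem), pairs_B by concatenating the proper suffixes atom_positions[k:], so no pair is ever enumerated.
import Mathlib
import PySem

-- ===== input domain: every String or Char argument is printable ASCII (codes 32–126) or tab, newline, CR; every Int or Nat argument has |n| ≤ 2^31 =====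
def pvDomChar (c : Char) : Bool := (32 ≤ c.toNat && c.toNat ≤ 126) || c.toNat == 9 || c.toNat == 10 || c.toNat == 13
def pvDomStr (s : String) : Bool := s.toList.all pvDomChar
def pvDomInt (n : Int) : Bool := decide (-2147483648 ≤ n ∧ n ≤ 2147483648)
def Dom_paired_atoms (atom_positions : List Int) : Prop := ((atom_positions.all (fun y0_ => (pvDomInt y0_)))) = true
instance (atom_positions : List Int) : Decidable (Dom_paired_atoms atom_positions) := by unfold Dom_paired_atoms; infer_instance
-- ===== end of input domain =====

-- B drops the pair-enumerating nested loop: pairs_A is built by replicating each element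
-- by its remaining-partner count and pairs_B by concatenating proper suffixes, in two
-- independent single passes (alternative decomposition, same asymptotic cost).

-- ===== PORT A =====
-- literal port of A's nested index loops, appending to both accumulators in lockstep
def paired_atoms (atom_positions : List Int) : List Int × List Int :=
  (PySem.List.pyRange 0 (atom_positions.length : Int) 1).foldl
    (fun st i =>
      (PySem.List.pyRange (i + 1) (atom_positions.length : Int) 1).foldl
        (fun st2 j =>
          (st2.1 ++ [PySem.List.pyGetD atom_positions i 0],
           st2.2 ++ [PySem.List.pyGetD atom_positions j 0]))
        st)
    ([], [])

-- ===== PORT B =====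
-- pairs_A: one pass over the list with an Int countdown 'rem' ([x] * rem, clamped at 0 like Python)
-- pairs_B: one pass over range(1, n), appending the slice atom_positions[k:]
def paired_atoms_alt (atom_positions : List Int) : List Int × List Int :=
  ((atom_positions.foldl
      (fun (st : List Int × Int) x => (st.1 ++ List.replicate st.2.toNat x, st.2 - 1))
      ([], (atom_positions.length : Int) - 1)).1,
   (PySem.List.pyRange 1 (atom_positions.length : Int) 1).foldl
      (fun acc k => acc ++ PySem.List.slice atom_positions (some k) none) [])

-- ===== PRECONDITION & SPEC =====
def Spec_paired_atoms (atom_positions : List Int) (out : List Int × List Int) : Prop := out = paired_atoms_alt atom_positions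
instance (atom_positions : List Int) (out : List Int × List Int) : Decidable (Spec_paired_atoms atom_positions out) := by unfold Spec_paired_atoms; infer_instance

-- ===== CLAIM =====
def Claim_equal_paired_atoms : Prop := ∀ (atom_positions : List Int), Dom_paired_atoms atom_positions → Spec_paired_atoms atom_positions (paired_atoms atom_positions)

-- ===== LEMMAS AND PROOFS =====

-- reference recursions both ports are reduced to
def pvFst : List Int → List Int
  | [] => []
  | x :: r => List.replicate r.length x ++ pvFst r

def pvSnd : List Int → List Int
  | [] => []
  | _ :: r => r ++ pvSnd r

theorem pvSnd_short (ys : List Int) (h : ys.length ≤ 1) : pvSnd ys = [] := by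
  match ys, h with
  | [], _ => rfl
  | [x], _ => rfl

-- A's inner loop appends the constant c once per iteration and g j to the second list
theorem pv_inner_foldl (L : List Int) (c : Int) (g : Int → Int) (st : List Int × List Int) :
    L.foldl (fun st2 j => (st2.1 ++ [c], st2.2 ++ [g j])) st
      = (st.1 ++ List.replicate L.length c, st.2 ++ L.map g) := by
  induction L generalizing st with
  | nil => simp
  | cons x xs ih =>
    simp only [List.foldl_cons, List.length_cons, List.map_cons, ih]
    simp [List.replicate_succ]

-- A's outer loop from index k equals (pvFst, pvSnd) of the suffix
theorem pv_outer (xs : List Int) (m k : Nat) (hm : m = xs.length - k) (hk : k ≤ xs.length)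
    (acc : List Int × List Int) :
    (PySem.List.pyRange (k : Int) (xs.length : Int) 1).foldl
      (fun st i =>
        (PySem.List.pyRange (i + 1) (xs.length : Int) 1).foldl
          (fun st2 j =>
            (st2.1 ++ [PySem.List.pyGetD xs i 0], st2.2 ++ [PySem.List.pyGetD xs j 0]))
          st)
      acc
      = (acc.1 ++ pvFst (xs.drop k), acc.2 ++ pvSnd (xs.drop k)) := by
  induction m generalizing k acc with
  | zero =>
    have hk' : k = xs.length := by omega
    subst hk'
    rw [PySem.List.pyRange_one_eq_nil (by omega)]
    simp [pvFst, pvSnd]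
  | succ m ih =>
    have hklt : k < xs.length := by omega
    rw [PySem.List.pyRange_one_cons (by exact_mod_cast hklt)]
    simp only [List.foldl_cons]
    have hcast : ((k : Int) + 1) = ((k + 1 : Nat) : Int) := by push_cast; ring
    rw [hcast, pv_inner_foldl]
    have hget : PySem.List.pyGetD xs (k : Int) 0 = xs[k] := by
      simp [List.getElem?_eq_getElem hklt]
    have hmap : (PySem.List.pyRange ((k + 1 : Nat) : Int) (xs.length : Int) 1).map
        (fun j => PySem.List.pyGetD xs j 0) = xs.drop (k + 1) := by
      have := PySem.List.map_pyGetD_pyRange xs 0 (a := ((k + 1 : Nat) : Int)) (by omega)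
      simpa using this
    have hlen : (PySem.List.pyRange ((k + 1 : Nat) : Int) (xs.length : Int) 1).length
        = (xs.drop (k + 1)).length := by
      rw [PySem.List.length_pyRange_one]
      simp
      omega
    rw [ih (k + 1) (by omega) (by omega), hget, hmap, hlen]
    have hdrop : xs.drop k = xs[k] :: xs.drop (k + 1) := List.drop_eq_getElem_cons hklt
    rw [hdrop]
    simp [pvFst, pvSnd]

-- B's first pass: the countdown fold over ys starting at rem = ys.length - 1 builds pvFst ys
theorem pv_alt_fst (ys : List Int) (acc : List Int) :
    (ys.foldl (fun (st : List Int × Int) x => (st.1 ++ List.replicate st.2.toNat x, st.2 - 1))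
       (acc, (ys.length : Int) - 1)).1 = acc ++ pvFst ys := by
  induction ys generalizing acc with
  | nil => simp [pvFst]
  | cons x r ih =>
    simp only [List.foldl_cons, List.length_cons]
    have h1 : ((r.length + 1 : Nat) : Int) - 1 = (r.length : Int) := by push_cast; ring
    have h2 : ((r.length : Int)).toNat = r.length := by omega
    rw [h1, h2]
    have h3 : (r.length : Int) - 1 = (r.length : Int) - 1 := rfl
    have := ih (acc ++ List.replicate r.length x)
    simp only [pvFst]
    rw [← List.append_assoc]
    exact this

-- B's second pass: the suffix-concatenation fold from k builds pvSnd of drop (k-1)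
theorem pv_alt_snd (xs : List Int) (m k : Nat) (hk1 : 1 ≤ k) (hk : k ≤ xs.length)
    (hm : m = xs.length - k) (acc : List Int) :
    (PySem.List.pyRange (k : Int) (xs.length : Int) 1).foldl
      (fun acc j => acc ++ PySem.List.slice xs (some j) none) acc
      = acc ++ pvSnd (xs.drop (k - 1)) := by
  induction m generalizing k acc with
  | zero =>
    have hk' : k = xs.length := by omega
    subst hk'
    rw [PySem.List.pyRange_one_eq_nil (by omega)]
    rw [pvSnd_short _ (by simp; omega)]
    simp
  | succ m ih =>
    have hklt : k < xs.length := by omega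
    rw [PySem.List.pyRange_one_cons (by exact_mod_cast hklt)]
    simp only [List.foldl_cons]
    rw [PySem.List.slice_from _ (by positivity)]
    have htn : ((k : Int)).toNat = k := by omega
    rw [htn]
    have hcast : ((k : Int) + 1) = ((k + 1 : Nat) : Int) := by push_cast; ring
    rw [hcast, ih (k + 1) (by omega) (by omega) (by omega)]
    have hidx : k - 1 < xs.length := by omega
    have hdrop : xs.drop (k - 1) = xs[k - 1] :: xs.drop (k - 1 + 1) :=
      List.drop_eq_getElem_cons hidx
    have hk2 : k - 1 + 1 = k := by omega
    rw [hk2] at hdrop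
    have hk3 : k + 1 - 1 = k := by omega
    rw [hk3, hdrop]
    simp [pvSnd]

-- ===== VERDICT =====
theorem paired_atoms_spec : Claim_equal_paired_atoms := by
  intro xs _
  show paired_atoms xs = paired_atoms_alt xs
  unfold paired_atoms paired_atoms_alt
  have hA := pv_outer xs xs.length 0 (by omega) (by omega) ([], [])
  have hB1 := pv_alt_fst xs []
  norm_num at hA hB1
  rw [hA, Prod.mk.injEq]
  refine ⟨hB1.symm, ?_⟩
  cases xs with
  | nil => simp [PySem.List.pyRange_one_eq_nil, pvSnd]
  | cons x r =>
    have hB2 := pv_alt_snd (x :: r) ((x :: r).length - 1) 1 (by omega) (by simp) (by omega) []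
    simp only [Nat.cast_one, List.nil_append] at hB2
    rw [hB2]
    simp
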